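-- pv_equiv track=rewrite | github.com/RocketDev-TV/Ejercicios-practica-Python | ejercicios/progFuncional/ejercicio8.py | transformacion
-- ===== SOURCE A (Python) =====
-- def transformacion(diccionario):
--     dicc_n = {}
--
--     for materia,nota in diccionario.items():
--         if nota >= 6 and nota < 8:
--             dicc_n[materia.upper()] = "Calif. baja"
--         elif nota >= 8 and nota < 9:
--             dicc_n[materia.upper()] = "Calif. regular"
--         elif nota >= 9:
--             dicc_n[materia.upper()] = "Calif. buena"
--
--     return dicc_n
-- ===== SOURCE B (Python) =====
-- # B: classification via a boundary/label table: the label index is the number of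
-- # boundaries <= nota, replacing A's if/elif cascade with a data-driven lookup.
-- def transformacion(diccionario):
--     boundaries = [6, 8, 9]
--     labels = ["Calif. baja", "Calif. regular", "Calif. buena"]
--     dicc_n = {}
--     for materia, nota in diccionario.items():
--         idx = sum(1 for b in boundaries if b <= nota) - 1
--         if idx >= 0:
--             dicc_n[materia.upper()] = labels[idx]
--     return dicc_n
-- ===== Notes on version B (the rewrite author's own statement) =====
-- stated objective: alternative
-- what changed: Replaces A's if/elif comparison cascade with a boundary/label classification table: the label index is computed as the count of boundaries <= nota and looked up in a parallel label list (notes below 6 skipped when the index is negative).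
import Mathlib
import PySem

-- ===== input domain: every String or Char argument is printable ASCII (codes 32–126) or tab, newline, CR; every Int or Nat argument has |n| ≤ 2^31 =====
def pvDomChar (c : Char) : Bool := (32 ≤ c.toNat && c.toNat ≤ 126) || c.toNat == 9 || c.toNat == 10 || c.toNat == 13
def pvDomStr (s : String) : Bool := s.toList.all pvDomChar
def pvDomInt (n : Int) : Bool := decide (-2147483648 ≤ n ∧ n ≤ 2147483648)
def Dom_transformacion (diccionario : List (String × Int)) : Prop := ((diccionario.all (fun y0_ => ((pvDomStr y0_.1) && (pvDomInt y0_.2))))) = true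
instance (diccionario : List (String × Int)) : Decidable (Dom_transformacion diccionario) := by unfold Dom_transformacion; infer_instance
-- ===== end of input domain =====

-- B replaces A's if/elif cascade with a boundary/label classification table (no speed claim).
-- ===== PORT A =====
def transformacion (diccionario : List (String × Int)) : List (String × String) :=
  (diccionario.foldl (fun dicc_n p =>
    let materia := p.1; let nota := p.2
    if nota ≥ 6 ∧ nota < 8 then dicc_n.insert (PySem.Str.upper materia) "Calif. baja"
    else if nota ≥ 8 ∧ nota < 9 then dicc_n.insert (PySem.Str.upper materia) "Calif. regular"
    else if nota ≥ 9 then dicc_n.insert (PySem.Str.upper materia) "Calif. buena"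
    else dicc_n) (PySem.Dict.empty : PySem.Dict String String)).items

-- ===== PORT B =====
def transformacion_alt (diccionario : List (String × Int)) : List (String × String) :=
  let boundaries : List Int := [6, 8, 9]
  let labels : List String := ["Calif. baja", "Calif. regular", "Calif. buena"]
  (diccionario.foldl (fun dicc_n p =>
    let idx : Int := (boundaries.foldl (fun s b => if b ≤ p.2 then s + 1 else s) 0) - 1
    if 0 ≤ idx then dicc_n.insert (PySem.Str.upper p.1) (labels.getD idx.toNat "")
    else dicc_n) (PySem.Dict.empty : PySem.Dict String String)).items

-- ===== PRECONDITION & SPEC =====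
def Spec_transformacion (diccionario : List (String × Int)) (out : List (String × String)) : Prop := out = transformacion_alt diccionario
instance (diccionario : List (String × Int)) (out : List (String × String)) : Decidable (Spec_transformacion diccionario out) := by unfold Spec_transformacion; infer_instance

-- ===== CLAIM (what is proved, stated in full; the proofs are below) =====
def Claim_equal_transformacion : Prop := ∀ (diccionario : List (String × Int)), Dom_transformacion diccionario → Spec_transformacion diccionario (transformacion diccionario)

-- ===== LEMMAS AND PROOFS =====

lemma step_eq (dicc_n : PySem.Dict String String) (p : String × Int) :
    (let materia := p.1; let nota := p.2
     if nota ≥ 6 ∧ nota < 8 then dicc_n.insert (PySem.Str.upper materia) "Calif. baja"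
     else if nota ≥ 8 ∧ nota < 9 then dicc_n.insert (PySem.Str.upper materia) "Calif. regular"
     else if nota ≥ 9 then dicc_n.insert (PySem.Str.upper materia) "Calif. buena"
     else dicc_n)
    = (let idx : Int := (([6, 8, 9] : List Int).foldl (fun s b => if b ≤ p.2 then s + 1 else s) 0) - 1
       if 0 ≤ idx then dicc_n.insert (PySem.Str.upper p.1)
         ((["Calif. baja", "Calif. regular", "Calif. buena"] : List String).getD idx.toNat "")
       else dicc_n) := by
  simp only [List.foldl]
  split_ifs <;> first | rfl | omega

lemma foldl_eq (diccionario : List (String × Int)) (d : PySem.Dict String String) :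
    diccionario.foldl (fun dicc_n p =>
      let materia := p.1; let nota := p.2
      if nota ≥ 6 ∧ nota < 8 then dicc_n.insert (PySem.Str.upper materia) "Calif. baja"
      else if nota ≥ 8 ∧ nota < 9 then dicc_n.insert (PySem.Str.upper materia) "Calif. regular"
      else if nota ≥ 9 then dicc_n.insert (PySem.Str.upper materia) "Calif. buena"
      else dicc_n) d
    = diccionario.foldl (fun dicc_n p =>
      let idx : Int := (([6, 8, 9] : List Int).foldl (fun s b => if b ≤ p.2 then s + 1 else s) 0) - 1
      if 0 ≤ idx then dicc_n.insert (PySem.Str.upper p.1)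
        ((["Calif. baja", "Calif. regular", "Calif. buena"] : List String).getD idx.toNat "")
      else dicc_n) d := by
  induction diccionario generalizing d with
  | nil => rfl
  | cons p t ih => simp only [List.foldl]; rw [step_eq]; exact ih _

-- ===== VERDICT =====
theorem transformacion_spec : Claim_equal_transformacion := by
  intro d _
  unfold Spec_transformacion transformacion transformacion_alt
  rw [foldl_eq]
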